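-- pv_equiv track=rewrite | github.com/AustinGrm/ReaderStudio | src/processor/annotation.py | _group_annotations_by_book
-- ===== SOURCE A (Python) =====
-- from typing import Dict, List, Tuple, Optional, Set
--
-- def _group_annotations_by_book(annotations: List[Dict]) -> Dict[str, List[Dict]]:
--     """Group annotations by book title."""
--     grouped = {}
--
--     for annotation in annotations:
--         book_title = annotation.get('book_title')
--         if not book_title:
--             continue
--
--         if book_title not in grouped:
--             grouped[book_title] = []
--
--         grouped[book_title].append(annotation)
--
--     return grouped
-- ===== SOURCE B (Python) =====
-- from typing import Dict, List
--
-- def _group_annotations_by_book(annotations: List[Dict]) -> Dict[str, List[Dict]]: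
--     """Group annotations by book title: collect distinct truthy titles in
--     first-appearance order, then build each group by filtering."""
--     titles = []
--     for a in annotations:
--         t = a.get('book_title')
--         if t and t not in titles:
--             titles.append(t)
--     return {t: [a for a in annotations if a.get('book_title') == t] for t in titles}
-- ===== Notes on version B (the rewrite author's own statement) =====
-- stated objective: alternative
-- what changed: Replaces the single-pass accumulate-into-dict with a two-phase decomposition: one pass collects the distinct truthy titles in first-appearance order, then each group is built by filtering the annotation list for that title.
import Mathlib
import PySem

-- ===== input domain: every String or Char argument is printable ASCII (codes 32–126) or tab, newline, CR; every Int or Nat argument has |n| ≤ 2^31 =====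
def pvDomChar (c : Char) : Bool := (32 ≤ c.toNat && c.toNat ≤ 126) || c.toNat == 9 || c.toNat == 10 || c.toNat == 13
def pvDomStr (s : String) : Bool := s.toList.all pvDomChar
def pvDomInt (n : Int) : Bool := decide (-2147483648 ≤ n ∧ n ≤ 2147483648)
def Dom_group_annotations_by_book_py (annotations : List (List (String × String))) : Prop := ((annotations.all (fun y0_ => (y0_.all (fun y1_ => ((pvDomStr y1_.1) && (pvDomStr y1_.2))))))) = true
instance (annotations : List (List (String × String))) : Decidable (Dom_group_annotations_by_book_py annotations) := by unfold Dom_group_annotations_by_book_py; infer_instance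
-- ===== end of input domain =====

-- B replaces A's single-pass dict accumulation by a two-phase decomposition
-- (collect distinct truthy titles, then filter per title); same cost class, alternative structure.


-- ===== PORT A =====
-- one loop iteration of A: skip falsy titles, create the slot if absent, append
def pvGroupStep (grouped : PySem.Dict String (List (List (String × String))))
    (annotation : List (String × String)) : PySem.Dict String (List (List (String × String))) :=
  match (PySem.Dict.mk annotation).get? "book_title" with
  | none => grouped
  | some t =>
    if t = "" then grouped
    else
      let g := if grouped.contains t then grouped else grouped.insert t []
      g.modify t [] (fun l => l ++ [annotation])

def group_annotations_by_book_py (annotations : List (List (String × String))) : List (String × List (List (String × String))) :=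
  (annotations.foldl pvGroupStep PySem.Dict.empty).items

-- ===== PORT B =====
-- B's first pass: distinct truthy titles in first-appearance order
def pvTitleStep (ts : List String) (a : List (String × String)) : List String :=
  match (PySem.Dict.mk a).get? "book_title" with
  | none => ts
  | some t => if t = "" then ts else if t ∈ ts then ts else ts ++ [t]

def group_annotations_by_book_py_alt (annotations : List (List (String × String))) : List (String × List (List (String × String))) :=
  (annotations.foldl pvTitleStep []).map
    (fun t => (t, annotations.filter (fun a => (PySem.Dict.mk a).get? "book_title" == some t)))

-- ===== PRECONDITION & SPEC =====
def Spec_group_annotations_by_book_py (annotations : List (List (String × String))) (out : List (String × List (List (String × String)))) : Prop := out = group_annotations_by_book_py_alt annotations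
instance (annotations : List (List (String × String))) (out : List (String × List (List (String × String)))) : Decidable (Spec_group_annotations_by_book_py annotations out) := by unfold Spec_group_annotations_by_book_py; infer_instance

-- ===== CLAIM (what is proved, stated in full; the proofs are below) =====
def Claim_equal_group_annotations_by_book_py : Prop := ∀ (annotations : List (List (String × String))), Dom_group_annotations_by_book_py annotations → Spec_group_annotations_by_book_py annotations (group_annotations_by_book_py annotations)

-- ===== LEMMAS AND PROOFS =====

-- loop invariant tying A's dict to B's title list and per-title filters
theorem pv_main (l : List (List (String × String)))
    (d : PySem.Dict String (List (List (String × String)))) (ts : List String)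
    (hk : d.keys = ts) (hnd : d.keys.Nodup) (hne : ∀ t ∈ ts, t ≠ "") :
    (l.foldl pvGroupStep d).keys = l.foldl pvTitleStep ts ∧
    (l.foldl pvGroupStep d).keys.Nodup ∧
    (∀ t ∈ l.foldl pvTitleStep ts, t ≠ "") ∧
    (∀ t, t ≠ "" →
      (l.foldl pvGroupStep d).getD t [] =
        d.getD t [] ++ l.filter (fun a => (PySem.Dict.mk a).get? "book_title" == some t)) := by
  induction l generalizing d ts with
  | nil => exact ⟨hk, hnd, hne, fun t _ => by simp⟩
  | cons a l ih =>
    simp only [List.foldl_cons, List.filter_cons]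
    have hstep :
        (pvGroupStep d a).keys = pvTitleStep ts a ∧ (pvGroupStep d a).keys.Nodup ∧
        (∀ t ∈ pvTitleStep ts a, t ≠ "") ∧
        (∀ t, t ≠ "" →
          (pvGroupStep d a).getD t [] =
            d.getD t [] ++ (if ((PySem.Dict.mk a).get? "book_title" == some t) = true then [a] else [])) := by
      unfold pvGroupStep pvTitleStep
      cases hkey : (PySem.Dict.mk a).get? "book_title" with
      | none =>
        exact ⟨hk, hnd, hne, fun t _ => by simp⟩
      | some u =>
        dsimp only
        by_cases hu : u = ""
        · subst hu
          rw [if_pos rfl]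
          refine ⟨hk, hnd, hne, fun t ht => ?_⟩
          simp [Ne.symm ht]
        · simp only [if_neg hu]
          have hcont : d.contains u = decide (u ∈ ts) := by
            rw [PySem.Dict.contains_eq_decide_mem_keys, hk]
          by_cases hmem : u ∈ ts
          · have hc : d.contains u = true := by simp [hcont, hmem]
            simp only [if_pos hc, if_pos hmem]
            refine ⟨?_, ?_, hne, fun t ht => ?_⟩
            · rw [PySem.Dict.keys_modify, PySem.Dict.keys_insert_of_contains _ _ hc, hk]
            · rw [PySem.Dict.keys_modify, PySem.Dict.keys_insert_of_contains _ _ hc]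
              exact hnd
            · rw [PySem.Dict.getD_modify]
              by_cases htu : t = u
              · subst htu; simp
              · simp [htu, Ne.symm htu]
          · have hc : d.contains u = false := by simp [hcont, hmem]
            simp only [hc, Bool.false_eq_true, if_false, if_neg hmem]
            have hndts : ts.Nodup := hk ▸ hnd
            refine ⟨?_, ?_, ?_, fun t ht => ?_⟩
            · rw [PySem.Dict.keys_modify, PySem.Dict.insert_insert_self,
                PySem.Dict.keys_insert_of_not_contains _ _ hc, hk]
            · rw [PySem.Dict.keys_modify, PySem.Dict.insert_insert_self,
                PySem.Dict.keys_insert_of_not_contains _ _ hc, hk]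
              simp [List.nodup_append, hndts]
              exact fun x hx h => hmem (h ▸ hx)
            · intro t htm
              rcases List.mem_append.mp htm with h | h
              · exact hne t h
              · simp only [List.mem_singleton] at h; subst h; exact hu
            · rw [PySem.Dict.getD_modify]
              by_cases htu : t = u
              · subst htu
                simp [PySem.Dict.getD_of_not_contains d _ hc]
              · simp [htu, PySem.Dict.getD_insert, Ne.symm htu]
    obtain ⟨h1, h2, h3, h4⟩ := hstep
    obtain ⟨g1, g2, g3, g4⟩ := ih (pvGroupStep d a) (pvTitleStep ts a) h1 h2 h3
    refine ⟨g1, g2, g3, fun t ht => ?_⟩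
    rw [g4 t ht, h4 t ht]
    by_cases hp : ((PySem.Dict.mk a).get? "book_title" == some t) = true <;> simp [hp]

-- ===== VERDICT (by name: the statement is the Claim_ definition above) =====
theorem group_annotations_by_book_py_spec : Claim_equal_group_annotations_by_book_py := by
  intro annotations _
  unfold Spec_group_annotations_by_book_py group_annotations_by_book_py group_annotations_by_book_py_alt
  obtain ⟨hkeys, hnd, hne, hget⟩ :=
    pv_main annotations PySem.Dict.empty [] (by simp) (by simp) (by simp)
  rw [PySem.Dict.items_eq_map_keys _ hnd ([] : List (List (String × String))), hkeys]
  refine List.map_congr_left fun t ht => ?_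
  rw [hget t (hne t ht)]
  simp
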